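-- pv_equiv track=rewrite | github.com/mto9902/SheetMusicGenerator | backend/app/generator/_texture.py | _align_target_pitch
-- ===== SOURCE A (Python) =====
-- def _align_target_pitch(
--     pool: list[int],
--     target_pitch: int,
--     reference_pitch: int,
--     max_leap: int,
-- ) -> int:
--     reachable = [
--         candidate
--         for candidate in pool
--         if abs(int(candidate) - int(reference_pitch)) <= max_leap
--     ]
--     search_pool = reachable or pool
--     return min(search_pool, key=lambda candidate: abs(int(candidate) - int(target_pitch)))
-- ===== SOURCE B (Python) =====
-- def _align_target_pitch(
--     pool: list[int],
--     target_pitch: int,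
--     reference_pitch: int,
--     max_leap: int,
-- ) -> int:
--     # Stable-sort candidates by closeness to the target (ties keep pool order,
--     # exactly like min's first-wins rule), then take the first one within the
--     # leap limit; if none is reachable, the overall closest is just the head.
--     ordered = sorted(pool, key=lambda candidate: abs(int(candidate) - int(target_pitch)))
--     for candidate in ordered:
--         if abs(int(candidate) - int(reference_pitch)) <= max_leap:
--             return candidate
--     return ordered[0]
-- ===== Notes on version B (the rewrite author's own statement) =====
-- stated objective: alternative
-- what changed: Replaces filter-then-min by a stable sort of the whole pool by distance to the target followed by a scan for the first candidate within the leap (falling back to the sorted head); no filtered list and no min are computed, correctness rests on stability reproducing min's first-wins tie-break.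
import Mathlib
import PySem

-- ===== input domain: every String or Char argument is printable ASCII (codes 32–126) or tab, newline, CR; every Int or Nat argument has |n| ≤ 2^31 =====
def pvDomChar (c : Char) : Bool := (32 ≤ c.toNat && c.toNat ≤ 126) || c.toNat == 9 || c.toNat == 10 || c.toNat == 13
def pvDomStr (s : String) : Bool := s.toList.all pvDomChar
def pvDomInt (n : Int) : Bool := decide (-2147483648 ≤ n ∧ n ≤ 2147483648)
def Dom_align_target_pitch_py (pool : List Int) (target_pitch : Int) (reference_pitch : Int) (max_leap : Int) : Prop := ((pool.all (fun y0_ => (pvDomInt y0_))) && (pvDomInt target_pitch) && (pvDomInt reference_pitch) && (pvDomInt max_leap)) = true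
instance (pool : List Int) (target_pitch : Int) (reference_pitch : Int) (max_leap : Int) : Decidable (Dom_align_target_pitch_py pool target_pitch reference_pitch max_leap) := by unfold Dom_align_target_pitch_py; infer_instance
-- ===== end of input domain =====

-- B replaces A's filter-then-min by a stable sort by distance-to-target followed by a first-within-leap scan; return values agree on every non-empty pool.


-- ===== PORT A =====
def align_target_pitch_py (pool : List Int) (target_pitch : Int) (reference_pitch : Int) (max_leap : Int) : Int :=
  let reachable := pool.filter (fun candidate => decide (|candidate - reference_pitch| ≤ max_leap))
  let search_pool := if reachable = [] then pool else reachable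
  (PySem.List.min? search_pool (fun candidate => |candidate - target_pitch|)).getD 0

-- ===== PORT B =====
def align_target_pitch_py_alt (pool : List Int) (target_pitch : Int) (reference_pitch : Int) (max_leap : Int) : Int :=
  let ordered := PySem.List.sorted pool (fun candidate => |candidate - target_pitch|) false
  match ordered.find? (fun candidate => decide (|candidate - reference_pitch| ≤ max_leap)) with
  | some candidate => candidate
  | none => (PySem.List.pyGet? ordered 0).getD 0

-- ===== PRECONDITION & SPEC =====
-- A raises ValueError (min of an empty sequence) on an empty pool; Pre_ excludes exactly that.
def Pre_align_target_pitch_py (pool : List Int) (target_pitch : Int) (reference_pitch : Int) (max_leap : Int) : Prop := pool ≠ []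
instance (pool : List Int) (target_pitch : Int) (reference_pitch : Int) (max_leap : Int) : Decidable (Pre_align_target_pitch_py pool target_pitch reference_pitch max_leap) := by unfold Pre_align_target_pitch_py; infer_instance
def pvWitness_align_target_pitch_py : List Int × Int × Int × Int := ([60, 67, 72], 64, 60, 5)
def Spec_align_target_pitch_py (pool : List Int) (target_pitch : Int) (reference_pitch : Int) (max_leap : Int) (out : Int) : Prop := out = align_target_pitch_py_alt pool target_pitch reference_pitch max_leap
instance (pool : List Int) (target_pitch : Int) (reference_pitch : Int) (max_leap : Int) (out : Int) : Decidable (Spec_align_target_pitch_py pool target_pitch reference_pitch max_leap out) := by unfold Spec_align_target_pitch_py; infer_instance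

-- ===== CLAIM (what is proved, stated in full; the proofs are below) =====
def Claim_equal_align_target_pitch_py : Prop := ∀ (pool : List Int) (target_pitch : Int) (reference_pitch : Int) (max_leap : Int), Dom_align_target_pitch_py pool target_pitch reference_pitch max_leap → Pre_align_target_pitch_py pool target_pitch reference_pitch max_leap → Spec_align_target_pitch_py pool target_pitch reference_pitch max_leap (align_target_pitch_py pool target_pitch reference_pitch max_leap)

-- ===== LEMMAS AND PROOFS =====

-- how the first p-element changes when one more element is merged in (proof-side helper)
def stepFound (key : Int → Int) (p : Int → Bool) (x : Int) : Option Int → Option Int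
  | none => if p x then some x else none
  | some m => if p x && decide (key x < key m) then some x else some m

-- inserting x into a key-sorted list: the first p-element of the result, from the first p-element of the old list
lemma find?_insertBy (key : Int → Int) (p : Int → Bool) (x : Int) (s : List Int)
    (hs : s.Pairwise (fun a b => key a ≤ key b)) :
    (PySem.List.insertBy (fun a b => decide (key a < key b)) x s).find? p =
      stepFound key p x (s.find? p) := by
  induction s with
  | nil => cases hpx : p x <;> simp [PySem.List.insertBy, stepFound, hpx]
  | cons y s ih =>
      have hy : ∀ m ∈ s, key y ≤ key m := (List.pairwise_cons.mp hs).1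
      have hs' := (List.pairwise_cons.mp hs).2
      simp only [PySem.List.insertBy]
      by_cases hlt : key x < key y
      · simp only [hlt, decide_true, if_true]
        cases hpx : p x
        · cases hfy : (y :: s).find? p <;> simp [stepFound, hfy, hpx]
        · cases hfy : (y :: s).find? p with
          | none => simp [stepFound, hpx]
          | some m =>
              have hm : m ∈ y :: s := List.mem_of_find?_eq_some hfy
              have hkm : key y ≤ key m := by
                rcases List.mem_cons.mp hm with h | h
                · exact h ▸ le_refl _
                · exact hy m h
              have hxm : key x < key m := lt_of_lt_of_le hlt hkm
              simp [stepFound, hpx, hxm]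
      · simp only [hlt, decide_false, Bool.false_eq_true, if_false]
        cases hpy : p y
        · simp only [List.find?_cons, hpy]
          exact ih hs'
        · simp only [List.find?_cons, hpy]
          simp [stepFound, hlt]

-- the heart: scanning the stable sort for the first p-element IS min over the p-filtered list
lemma find?_sorted_eq_min?_filter (key : Int → Int) (p : Int → Bool) (xs : List Int) :
    (PySem.List.sorted xs key false).find? p = PySem.List.min? (xs.filter p) key := by
  induction xs using List.reverseRecOn with
  | nil => simp [PySem.List.sorted, PySem.List.min?]
  | append_singleton xs x ih =>
      have hsorted : PySem.List.sorted (xs ++ [x]) key false =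
          PySem.List.insertBy (fun a b => decide (key a < key b)) x (PySem.List.sorted xs key false) := by
        rw [PySem.List.sorted_eq_foldl_insertBy, PySem.List.sorted_eq_foldl_insertBy, List.foldl_append]
        rfl
      rw [hsorted, find?_insertBy key p x _ (PySem.List.sorted_pairwise xs key), ih]
      unfold PySem.List.min?
      rw [List.filter_append, List.foldl_append]
      cases hpx : p x
      · simp only [List.filter_cons, hpx, Bool.false_eq_true, if_false, List.filter_nil,
          List.foldl_nil, stepFound]
        split <;> simp_all
      · simp only [List.filter_cons, hpx, if_true, List.filter_nil, List.foldl_cons,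
          List.foldl_nil, stepFound]
        split <;> simp_all

-- find? with an always-true predicate is head?
lemma find?_true_eq_head? (l : List Int) : l.find? (fun _ => true) = l.head? := by
  cases l <;> simp

-- head of the sort = min over the whole list (the p := always-true instance)
lemma head?_sorted_eq_min? (key : Int → Int) (xs : List Int) :
    (PySem.List.sorted xs key false).head? = PySem.List.min? xs key := by
  have h := find?_sorted_eq_min?_filter key (fun _ => true) xs
  rw [find?_true_eq_head?] at h
  simpa using h

-- ===== VERDICT (by name: the statement is the Claim_ definition above) =====
theorem align_target_pitch_py_spec : Claim_equal_align_target_pitch_py := by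
  intro pool t r L _ hpre
  unfold Spec_align_target_pitch_py align_target_pitch_py align_target_pitch_py_alt
  simp only
  set key : Int → Int := fun c => |c - t| with hkey
  set p : Int → Bool := fun c => decide (|c - r| ≤ L) with hp
  rw [find?_sorted_eq_min?_filter key p pool]
  by_cases hf : pool.filter p = []
  · rw [hf]
    simp only [(PySem.List.min?_eq_none_iff ([] : List Int) key).mpr rfl]
    have hplen : 0 < pool.length := List.length_pos_iff.mpr hpre
    have h0 : PySem.List.pyGet? (PySem.List.sorted pool key false) 0 =
        (PySem.List.sorted pool key false).head? := by
      simp [PySem.List.pyGet?, PySem.List.pyIdx?, hplen, List.head?_eq_getElem?]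
    rw [h0, head?_sorted_eq_min?]
    simp
  · rw [if_neg hf]
    cases hmin : PySem.List.min? (pool.filter p) key with
    | none => exact absurd ((PySem.List.min?_eq_none_iff _ _).mp hmin) hf
    | some m => simp
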